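-- pv_equiv track=rewrite | github.com/jzOcb/kalshi-trading | url_mapping.py | get_series_from_event
-- ===== SOURCE A (Python) =====
-- SERIES_SLUGS = {
--     # Economics
--     "KXCPI": ("kxcpi", "cpi"),
--     "KXCPICORE": ("kxcpicore", "cpi-core"),
--     "KXCPIYOY": ("kxcpiyoy", "inflation"),
--     "KXGDP": ("kxgdp", "us-gdp-growth"),
--     "KXPAYROLLS": ("kxpayrolls", "jobs-numbers"),
--     "KXFEDDECISION": ("kxfeddecision", "fed-meeting"),
--     "KXFED": ("kxfed", "fed-funds-rate"),
--     "KXU3": ("kxu3", "unemployment"),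
--     "KXAAAGASW": ("kxaaagasw", "us-gas-price-up"),
--     "KXAAAGASM": ("kxaaagasm", "us-gas-price"),
--
--     # Fed Mentions
--     "KXFEDMENTION": ("kxfedmention", "fed-mention"),
--
--     # Weather
--     "KXHIGH": ("kxhigh", "high-temperature"),
--     "KXLOW": ("kxlow", "low-temperature"),
-- }
--
-- def get_series_from_event(event_ticker: str) -> str:
--     """Extract series from event ticker (e.g., KXCPI-26FEB -> KXCPI)"""
--     parts = event_ticker.upper().split("-")
--     if len(parts) >= 2:
--         # Try progressively shorter prefixes
--         for i in range(len(parts), 0, -1):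
--             candidate = "-".join(parts[:i])
--             if candidate in SERIES_SLUGS:
--                 return candidate
--         # Fallback: first part
--         return parts[0]
--     return event_ticker
-- ===== SOURCE B (Python) =====
-- def get_series_from_event(event_ticker: str) -> str:
--     """Extract series from event ticker (e.g., KXCPI-26FEB -> KXCPI)"""
--     idx = event_ticker.find("-")
--     if idx != -1:
--         return event_ticker[:idx].upper()
--     return event_ticker
-- ===== Notes on version B (the rewrite author's own statement) =====
-- stated objective: simpler
-- what changed: B drops the SERIES_SLUGS dict and the descending prefix-join loop entirely and just slices at the first hyphen (uppercased), returning the input unchanged when no hyphen exists; this is exact because no dict key contains a hyphen, so A's loop can only ever return parts[0].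
import Mathlib
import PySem

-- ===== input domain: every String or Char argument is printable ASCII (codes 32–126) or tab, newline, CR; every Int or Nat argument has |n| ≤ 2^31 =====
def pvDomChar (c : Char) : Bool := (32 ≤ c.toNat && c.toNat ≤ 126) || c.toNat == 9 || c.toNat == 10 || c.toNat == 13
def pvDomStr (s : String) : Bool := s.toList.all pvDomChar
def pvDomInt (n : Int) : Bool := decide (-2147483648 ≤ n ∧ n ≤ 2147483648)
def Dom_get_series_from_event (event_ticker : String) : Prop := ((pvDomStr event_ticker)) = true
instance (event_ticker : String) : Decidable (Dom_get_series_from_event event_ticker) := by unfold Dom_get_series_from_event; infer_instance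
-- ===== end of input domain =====

-- B replaces A's SERIES_SLUGS lookup and descending prefix-join loop by a single slice at the
-- first hyphen (objective: simpler); exact because no dict key contains a hyphen.

-- ===== PORT A =====
def pvSeriesSlugs : PySem.Dict String (String × String) :=
  PySem.Dict.ofList
    [ ("KXCPI", ("kxcpi", "cpi"))
    , ("KXCPICORE", ("kxcpicore", "cpi-core"))
    , ("KXCPIYOY", ("kxcpiyoy", "inflation"))
    , ("KXGDP", ("kxgdp", "us-gdp-growth"))
    , ("KXPAYROLLS", ("kxpayrolls", "jobs-numbers"))
    , ("KXFEDDECISION", ("kxfeddecision", "fed-meeting"))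
    , ("KXFED", ("kxfed", "fed-funds-rate"))
    , ("KXU3", ("kxu3", "unemployment"))
    , ("KXAAAGASW", ("kxaaagasw", "us-gas-price-up"))
    , ("KXAAAGASM", ("kxaaagasm", "us-gas-price"))
    , ("KXFEDMENTION", ("kxfedmention", "fed-mention"))
    , ("KXHIGH", ("kxhigh", "high-temperature"))
    , ("KXLOW", ("kxlow", "low-temperature")) ]

-- A's 'for i in range(len(parts), 0, -1)' loop with early return, then fallback parts[0]
def pvLoopA (parts : List String) : List Int → String
  | [] => (PySem.List.pyGet? parts 0).getD ""   -- parts[0]; guarded by len(parts) >= 2 at the call site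
  | i :: rest =>
      let candidate := PySem.Str.join "-" (PySem.List.slice parts none (some i))
      if pvSeriesSlugs.contains candidate then candidate else pvLoopA parts rest

def get_series_from_event (event_ticker : String) : String :=
  let parts := (PySem.Str.split? (PySem.Str.upper event_ticker) "-").getD []
  if 2 ≤ parts.length then
    pvLoopA parts (PySem.List.pyRange (parts.length : Int) 0 (-1))
  else event_ticker

-- ===== PORT B =====
def get_series_from_event_alt (event_ticker : String) : String :=
  let idx := PySem.Str.find event_ticker "-"
  if idx ≠ -1 then
    PySem.Str.upper (PySem.Str.slice event_ticker none (some idx))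
  else event_ticker

-- ===== PRECONDITION & SPEC =====
def Spec_get_series_from_event (event_ticker : String) (out : String) : Prop := out = get_series_from_event_alt event_ticker
instance (event_ticker : String) (out : String) : Decidable (Spec_get_series_from_event event_ticker out) := by unfold Spec_get_series_from_event; infer_instance

-- ===== CLAIM (what is proved, stated in full; the proofs are below) =====
def Claim_equal_get_series_from_event : Prop := ∀ (event_ticker : String), Dom_get_series_from_event event_ticker → Spec_get_series_from_event event_ticker (get_series_from_event event_ticker)

-- ===== LEMMAS AND PROOFS =====

theorem pv_upperChar_eq_dash_iff (c : Char) : PySem.Chars.upperChar c = '-' ↔ c = '-' := by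
  constructor
  · intro h
    unfold PySem.Chars.upperChar PySem.Chars.islower at h
    split_ifs at h with hl
    · exfalso
      have h1 : 'a' ≤ c ∧ c ≤ 'z' := by simpa using hl
      have hlo : 97 ≤ c.toNat := by
        have h2 := UInt32.le_iff_toNat_le.mp (Char.le_def.mp h1.1)
        have ha : ('a').val.toNat = 97 := by decide
        show 97 ≤ c.val.toNat
        omega
      have hhi : c.toNat ≤ 122 := by
        have h2 := UInt32.le_iff_toNat_le.mp (Char.le_def.mp h1.2)
        have ha : ('z').val.toNat = 122 := by decide
        show c.val.toNat ≤ 122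
        omega
      have ht := congrArg Char.toNat h
      rw [Char.toNat_ofNat] at ht
      have hv : (c.toNat - 32).isValidChar := by
        unfold Nat.isValidChar
        left; omega
      rw [if_pos hv] at ht
      have h45 : ('-').toNat = 45 := by decide
      omega
    · exact h
  · intro h; subst h; decide

theorem pv_findgo_not_mem (cs : List Char) (k : Nat) (h : '-' ∉ cs) :
    PySem.Chars.find.go ['-'] cs k = -1 := by
  induction cs generalizing k with
  | nil => simp [PySem.Chars.find.go]
  | cons c t ih =>
    have hc : c ≠ '-' := fun hc => h (hc ▸ List.mem_cons_self)
    have hnp : List.isPrefixOf ['-'] (c :: t) = false := by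
      simp [List.isPrefixOf]
      intro h'; exact absurd h'.symm hc
    rw [PySem.Chars.find.go, hnp]
    simp only [Bool.false_eq_true, if_false]
    exact ih _ (fun hm => h (List.mem_cons_of_mem _ hm))

theorem pv_findgo_mem (cs : List Char) (h : '-' ∈ cs) (k : Nat) :
    PySem.Chars.find.go ['-'] cs k = (k : Int) + (cs.takeWhile (fun c => c ≠ '-')).length := by
  induction cs generalizing k with
  | nil => simp at h
  | cons c t ih =>
    by_cases hc : c = '-'
    · subst hc
      rw [PySem.Chars.find.go]
      simp [List.isPrefixOf, List.takeWhile]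
    · have hnp : List.isPrefixOf ['-'] (c :: t) = false := by
        simp [List.isPrefixOf]
        intro h'; exact absurd h'.symm hc
      rw [PySem.Chars.find.go, hnp]
      simp only [Bool.false_eq_true, if_false]
      have ht : '-' ∈ t := by
        rcases List.mem_cons.mp h with h1 | h1
        · exact absurd h1.symm hc
        · exact h1
      rw [ih ht (k+1)]
      simp [List.takeWhile, hc]
      ring

theorem pv_splitgo_not_mem (fuel : Nat) (cs cur : List Char) (acc : List (List Char))
    (h : '-' ∉ cs) :
    PySem.Chars.splitOn.go ['-'] fuel cs cur acc = ((cur.reverse ++ cs) :: acc).reverse := by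
  induction fuel generalizing cs cur acc with
  | zero => rw [PySem.Chars.splitOn.go]
  | succ f ih =>
    cases cs with
    | nil =>
      rw [PySem.Chars.splitOn.go] <;> simp
    | cons c t =>
      have hc : c ≠ '-' := fun hc => h (hc ▸ List.mem_cons_self)
      have hnp : List.isPrefixOf ['-'] (c :: t) = false := by
        simp [List.isPrefixOf]
        intro h'; exact absurd h'.symm hc
      rw [PySem.Chars.splitOn.go, hnp]
      simp only [Bool.false_eq_true, if_false]
      rw [ih t (c :: cur) acc (fun hm => h (List.mem_cons_of_mem _ hm))]
      simp

theorem pv_splitgo_mem (fuel : Nat) (cs cur : List Char) (acc : List (List Char))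
    (h : '-' ∈ cs) (hf : cs.length < fuel) :
    ∃ tail, tail ≠ [] ∧
      PySem.Chars.splitOn.go ['-'] fuel cs cur acc
        = acc.reverse ++ (cur.reverse ++ cs.takeWhile (fun c => c ≠ '-')) :: tail := by
  induction fuel generalizing cs cur acc with
  | zero => omega
  | succ f ih =>
    cases cs with
    | nil => simp at h
    | cons c t =>
      by_cases hc : c = '-'
      · subst hc
        have hp : List.isPrefixOf ['-'] ('-' :: t) = true := by simp [List.isPrefixOf]
        rw [PySem.Chars.splitOn.go, hp]
        simp only [if_true, List.length_cons, List.length_nil,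
          List.drop_succ_cons, List.drop_zero]
        by_cases hm : '-' ∈ t
        · obtain ⟨tail, hne, heq⟩ := ih t [] (cur.reverse :: acc) hm (by simpa using Nat.lt_of_succ_lt_succ hf)
          refine ⟨t.takeWhile (fun c => c ≠ '-') :: tail, by simp, ?_⟩
          rw [heq]; simp [List.takeWhile]
        · rw [pv_splitgo_not_mem f t [] (cur.reverse :: acc) hm]
          refine ⟨[t], by simp, ?_⟩
          simp [List.takeWhile]
      · have hnp : List.isPrefixOf ['-'] (c :: t) = false := by
          simp [List.isPrefixOf]
          intro h'; exact absurd h'.symm hc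
        rw [PySem.Chars.splitOn.go, hnp]
        simp only [Bool.false_eq_true, if_false]
        have ht : '-' ∈ t := by
          rcases List.mem_cons.mp h with h1 | h1
          · exact absurd h1.symm hc
          · exact h1
        obtain ⟨tail, hne, heq⟩ := ih t (c :: cur) acc ht (by simpa using Nat.lt_of_succ_lt_succ hf)
        refine ⟨tail, hne, ?_⟩
        rw [heq]
        simp [List.takeWhile, hc]

theorem pv_contains_dash (s : String) (h : '-' ∈ s.toList) :
    pvSeriesSlugs.contains s = false := by
  by_contra hc
  rw [Bool.not_eq_false] at hc
  unfold PySem.Dict.contains at hc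
  rw [List.any_eq_true] at hc
  obtain ⟨p, hp, hbeq⟩ := hc
  have hpk : p.1 ∈ pvSeriesSlugs.items.map (·.1) := List.mem_map_of_mem hp
  have hkeys : pvSeriesSlugs.items.map (·.1) =
      ["KXCPI","KXCPICORE","KXCPIYOY","KXGDP","KXPAYROLLS","KXFEDDECISION","KXFED",
       "KXU3","KXAAAGASW","KXAAAGASM","KXFEDMENTION","KXHIGH","KXLOW"] := by decide
  rw [hkeys] at hpk
  have hps : p.1 = s := eq_of_beq hbeq
  rw [hps] at hpk
  fin_cases hpk <;> simp_all

theorem pv_loopA_eq (p0 p1 : String) (rest : List String) (is : List Int)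
    (h : ∀ i ∈ is, 1 ≤ i) : pvLoopA (p0 :: p1 :: rest) is = p0 := by
  induction is with
  | nil =>
    simp only [pvLoopA, PySem.List.pyGet?, PySem.List.pyIdx?]
    have hc : (0:Int) ≤ (rest.length:Int) + 1 := by positivity
    simp [hc]
  | cons i is ih =>
    have hi : 1 ≤ i := h i List.mem_cons_self
    have hih := ih (fun j hj => h j (List.mem_cons_of_mem _ hj))
    rw [pvLoopA]
    rw [PySem.List.slice_to _ (by omega)]
    rcases Nat.lt_or_ge i.toNat 2 with h2 | h2
    · have h1 : i.toNat = 1 := by omega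
      rw [h1]
      have hj : PySem.Str.join "-" (List.take 1 (p0 :: p1 :: rest)) = p0 := by
        show PySem.Str.join "-" [p0] = p0
        unfold PySem.Str.join
        simp only [List.map_cons, List.map_nil, PySem.Chars.join_singleton,
          String.ofList_toList]
      rw [hj]
      split_ifs <;> simp [hih]
    · obtain ⟨n, hn⟩ : ∃ n, i.toNat = n + 2 := ⟨i.toNat - 2, by omega⟩
      rw [hn]
      have hdash : '-' ∈ (PySem.Str.join "-" (List.take (n+2) (p0 :: p1 :: rest))).toList := by
        show '-' ∈ (PySem.Str.join "-" (p0 :: p1 :: List.take n rest)).toList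
        unfold PySem.Str.join
        rw [String.toList_ofList]
        have hsep : ("-" : String).toList = ['-'] := rfl
        simp only [List.map_cons, hsep, PySem.Chars.join_cons_cons]
        simp
      rw [pv_contains_dash _ hdash]
      simpa using hih

theorem pv_mem_pyRange_down (L i : Int) (h : i ∈ PySem.List.pyRange L 0 (-1)) : 1 ≤ i := by
  unfold PySem.List.pyRange at h
  norm_num at h
  split_ifs at h with h1
  · obtain ⟨k, hk, hik⟩ := by simpa [List.mem_map, List.mem_range] using h
    omega
  · simp at h

theorem pv_takeWhile_upper (cs : List Char) :
    List.takeWhile (fun c => c ≠ '-') (List.map PySem.Chars.upperChar cs)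
      = List.map PySem.Chars.upperChar (List.takeWhile (fun c => c ≠ '-') cs) := by
  rw [List.takeWhile_map]
  have hfun : ((fun c => decide (c ≠ '-')) ∘ PySem.Chars.upperChar)
      = (fun c : Char => decide (c ≠ '-')) := by
    funext c
    simp [Function.comp, pv_upperChar_eq_dash_iff]
  rw [hfun]

theorem pv_mem_upper (cs : List Char) :
    '-' ∈ List.map PySem.Chars.upperChar cs ↔ '-' ∈ cs := by
  constructor
  · intro h
    obtain ⟨a, ha, hu⟩ := List.mem_map.mp h
    exact ((pv_upperChar_eq_dash_iff a).mp hu) ▸ ha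
  · intro h
    exact List.mem_map.mpr ⟨'-', h, by decide⟩

-- ===== VERDICT (by name: the statement is the Claim_ definition above) =====
theorem get_series_from_event_spec : Claim_equal_get_series_from_event := by
  intro e _
  unfold Spec_get_series_from_event get_series_from_event get_series_from_event_alt
  have hup : (PySem.Str.upper e).toList = List.map PySem.Chars.upperChar e.toList := by
    unfold PySem.Str.upper PySem.Chars.upper
    rw [String.toList_ofList]
  have hsplit : PySem.Str.split? (PySem.Str.upper e) "-" =
      some (List.map String.ofList
        (PySem.Chars.splitOn (List.map PySem.Chars.upperChar e.toList) ['-'])) := by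
    unfold PySem.Str.split? PySem.Chars.split?
    rw [hup]
    rfl
  have hfind : PySem.Str.find e "-" = PySem.Chars.find.go ['-'] e.toList 0 := rfl
  by_cases hm : '-' ∈ e.toList
  · -- a hyphen exists: A returns parts[0], B returns upper(ticker[:idx])
    have hm' : '-' ∈ List.map PySem.Chars.upperChar e.toList := (pv_mem_upper _).mpr hm
    obtain ⟨tail, hne, heq⟩ := pv_splitgo_mem ((List.map PySem.Chars.upperChar e.toList).length + 1)
      (List.map PySem.Chars.upperChar e.toList) [] [] hm' (by omega)
    have hsplitOn : PySem.Chars.splitOn (List.map PySem.Chars.upperChar e.toList) ['-']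
        = (List.map PySem.Chars.upperChar e.toList).takeWhile (fun c => c ≠ '-') :: tail := by
      unfold PySem.Chars.splitOn
      rw [heq]; simp
    obtain ⟨t0, ts, rfl⟩ := List.exists_cons_of_ne_nil hne
    have hidx : PySem.Str.find e "-"
        = ((List.takeWhile (fun c => c ≠ '-') e.toList).length : Int) := by
      rw [hfind, pv_findgo_mem _ hm 0]; ring
    have hslice : PySem.Str.slice e none
          (some ((List.takeWhile (fun c => c ≠ '-') e.toList).length : Int))
        = String.ofList (List.takeWhile (fun c => c ≠ '-') e.toList) := by
      unfold PySem.Str.slice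
      congr 1
      rw [PySem.Chars.slice_eq_listSlice, PySem.List.slice_to _ (by positivity),
        Int.toNat_natCast]
      exact (List.prefix_iff_eq_take.mp (List.takeWhile_prefix _)).symm
    have hBupper : PySem.Str.upper
          (String.ofList (List.takeWhile (fun c => c ≠ '-') e.toList))
        = String.ofList (List.map PySem.Chars.upperChar
            (List.takeWhile (fun c => c ≠ '-') e.toList)) := by
      unfold PySem.Str.upper PySem.Chars.upper
      rw [String.toList_ofList]
    rw [hsplit]
    simp only [Option.getD_some, hsplitOn, List.map_cons, List.length_cons]
    rw [if_pos (by omega)]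
    rw [pv_loopA_eq _ _ _ _ (fun i hi => pv_mem_pyRange_down _ i hi)]
    simp only [hidx]
    rw [if_pos (by
      intro hcon
      have : (0:Int) ≤ ((List.takeWhile (fun c => c ≠ '-') e.toList).length : Int) := by positivity
      omega)]
    rw [hslice, hBupper, pv_takeWhile_upper]
  · -- no hyphen: both sides return the input unchanged
    have hm' : '-' ∉ List.map PySem.Chars.upperChar e.toList :=
      fun h => hm ((pv_mem_upper _).mp h)
    have hsplitOn : PySem.Chars.splitOn (List.map PySem.Chars.upperChar e.toList) ['-']
        = [List.map PySem.Chars.upperChar e.toList] := by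
      unfold PySem.Chars.splitOn
      rw [pv_splitgo_not_mem _ _ _ _ hm']
      simp
    rw [hsplit]
    simp only [Option.getD_some, hsplitOn, List.map_cons, List.map_nil, List.length_cons,
      List.length_nil]
    rw [if_neg (by omega)]
    simp only [hfind, pv_findgo_not_mem _ 0 hm]
    simp
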